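-- pv_equiv track=rewrite | github.com/TinacciL/QueryKIDAdatabase | kida_query_lib.py | ent_chose
-- ===== SOURCE A (Python) =====
-- def ent_chose(ent_list):
--     if len(ent_list) > 1:
--         tmp_e = []
--         tmp_t = []
--         for k,item in enumerate(ent_list):
--             tmp_e.append(ent_list[k][1].replace(" ",""))
--             tmp_t.append(ent_list[k][0].replace(" ",""))
--         tmp_max = max(tmp_t)
--         tmp_ind = tmp_t.index(tmp_max)
--         e = tmp_e[tmp_ind]
--         t = tmp_t[tmp_ind]
--     else:
--         e = ent_list[0][1].replace(" ","")
--         t = ent_list[0][0].replace(" ","")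
--     return(e,t)
-- ===== SOURCE B (Python) =====
-- def ent_chose(ent_list):
--     # single running-maximum pass; seeded from ent_list[0] (IndexError on empty, like A)
--     best_t = ent_list[0][0].replace(" ", "")
--     best_e = ent_list[0][1]
--     for t_raw, e_raw in ent_list[1:]:
--         t = t_raw.replace(" ", "")
--         if best_t < t:
--             best_t, best_e = t, e_raw
--     return (best_e.replace(" ", ""), best_t)
-- ===== Notes on version B (the rewrite author's own statement) =====
-- stated objective: simpler
-- what changed: Replaces A's two parallel intermediate lists plus max() plus list.index() (three extra passes) with one running-maximum fold over the pairs, keeping the first maximal element via a strict comparison.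
-- outside the precondition, e.g. on ent_chose([]): A raises IndexError, B raises IndexError
import Mathlib
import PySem

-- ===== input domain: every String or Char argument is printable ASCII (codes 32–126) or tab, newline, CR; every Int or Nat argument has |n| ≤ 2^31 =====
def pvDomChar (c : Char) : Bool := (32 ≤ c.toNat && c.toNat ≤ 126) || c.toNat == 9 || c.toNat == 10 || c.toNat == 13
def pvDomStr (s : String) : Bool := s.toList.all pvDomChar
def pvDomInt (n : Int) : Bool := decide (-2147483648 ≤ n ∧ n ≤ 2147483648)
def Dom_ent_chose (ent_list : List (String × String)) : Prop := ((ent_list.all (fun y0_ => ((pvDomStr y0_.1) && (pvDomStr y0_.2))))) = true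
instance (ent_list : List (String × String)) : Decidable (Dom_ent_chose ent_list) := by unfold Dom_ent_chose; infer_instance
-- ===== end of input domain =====

-- B replaces A's parallel lists + max() + .index() with one running-maximum fold (simpler; same cost).
-- ===== PORT A =====
def ent_chose (ent_list : List (String × String)) : String × String :=
  if ent_list.length > 1 then
    -- for k,item in enumerate(ent_list): append stripped snd / fst (ent_list[k] = item)
    let tmp := (PySem.List.enumerate ent_list 0).foldl
      (fun (acc : List String × List String) ki =>
        (acc.1 ++ [PySem.Str.replace ki.2.2 " " ""], acc.2 ++ [PySem.Str.replace ki.2.1 " " ""]))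
      ([], [])
    match PySem.List.max? tmp.2 (fun x => x) with
    | some tmp_max =>
      match PySem.List.index? tmp.2 tmp_max with
      | some tmp_ind => (tmp.1.getD tmp_ind "", tmp.2.getD tmp_ind "")
      | none => ("", "")   -- unreachable: tmp_max ∈ tmp.2
    | none => ("", "")     -- unreachable under the length > 1 guard
  else
    -- ent_list[0]: IndexError on [], excluded by Pre_
    (PySem.Str.replace (PySem.List.pyGetD ent_list 0 ("", "")).2 " " "",
     PySem.Str.replace (PySem.List.pyGetD ent_list 0 ("", "")).1 " " "")

-- ===== PORT B =====
def ent_chose_alt (ent_list : List (String × String)) : String × String :=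
  match ent_list with
  | [] => ("", "")  -- unreachable: Python raises IndexError here, excluded by Pre_
  | p0 :: rest =>
    let st := rest.foldl
      (fun (s : String × String) p =>
        let t := PySem.Str.replace p.1 " " ""
        if s.1 < t then (t, p.2) else s)
      (PySem.Str.replace p0.1 " " "", p0.2)
    (PySem.Str.replace st.2 " " "", st.1)

-- ===== PRECONDITION & SPEC =====
-- Pre_ excludes exactly the empty list, on which both Pythons raise IndexError.
def Pre_ent_chose (ent_list : List (String × String)) : Prop := ent_list ≠ []
instance (ent_list : List (String × String)) : Decidable (Pre_ent_chose ent_list) := by unfold Pre_ent_chose; infer_instance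
def pvWitness_ent_chose : (List (String × String)) := [("a b", "c"), ("z", "y x")]

def Spec_ent_chose (ent_list : List (String × String)) (out : String × String) : Prop := out = ent_chose_alt ent_list
instance (ent_list : List (String × String)) (out : String × String) : Decidable (Spec_ent_chose ent_list out) := by unfold Spec_ent_chose; infer_instance

-- ===== CLAIM (what is proved, stated in full; the proofs are below) =====
def Claim_equal_ent_chose : Prop := ∀ (ent_list : List (String × String)), Dom_ent_chose ent_list → Pre_ent_chose ent_list → Spec_ent_chose ent_list (ent_chose ent_list)

-- ===== LEMMAS AND PROOFS =====

-- stripped first component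
def pvSt (p : String × String) : String × String := (PySem.Str.replace p.1 " " "", p.2)

-- B's fold on pre-stripped pairs
def pvRun (l : List (String × String)) (q : String × String) : String × String :=
  l.foldl (fun s p => if s.1 < p.1 then p else s) q

lemma pvRun_eq_fold (l : List (String × String)) (q : String × String) :
    l.foldl (fun (s : String × String) p =>
        let t := PySem.Str.replace p.1 " " ""
        if s.1 < t then (t, p.2) else s) q = pvRun (l.map pvSt) q := by
  rw [pvRun, List.foldl_map]; rfl

-- A's list-building loop produces the two stripped projection lists
lemma pvBuild (l : List (String × String)) (s : Int) (a b : List String) :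
    (PySem.List.enumerate l s).foldl
      (fun (acc : List String × List String) ki =>
        (acc.1 ++ [PySem.Str.replace ki.2.2 " " ""], acc.2 ++ [PySem.Str.replace ki.2.1 " " ""]))
      (a, b)
    = (a ++ l.map (fun p => PySem.Str.replace p.2 " " ""),
       b ++ l.map (fun p => PySem.Str.replace p.1 " " "")) := by
  induction l generalizing s a b with
  | nil => simp [PySem.List.enumerate]
  | cons p l ih => simp [PySem.List.enumerate, ih]

-- the running max with strict < returns the FIRST pair achieving the maximal first component
lemma pvRun_spec (l : List (String × String)) (q : String × String) (k : Nat)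
    (h : PySem.List.index? ((q :: l).map Prod.fst) ((l.map Prod.fst).foldl max q.1) = some k) :
    pvRun l q = (q :: l).getD k ("", "") := by
  induction l generalizing q k with
  | nil =>
    simp only [List.map_nil, List.foldl_nil, List.map_cons, PySem.List.index?_cons_self] at h
    obtain rfl : (0 : Nat) = k := by simpa using h
    simp [pvRun]
  | cons p l ih =>
    have hrun : pvRun (p :: l) q = pvRun l (if q.1 < p.1 then p else q) := rfl
    by_cases hpq : q.1 < p.1
    · -- seed becomes p; q.1 < max, so the head q.1 is skipped by index?
      have hmax : max q.1 p.1 = p.1 := max_eq_right (le_of_lt hpq)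
      have hple : p.1 ≤ (l.map Prod.fst).foldl max p.1 := (PySem.List.le_foldl_max _ _).1
      have hqne : q.1 ≠ (l.map Prod.fst).foldl max p.1 :=
        ne_of_lt (lt_of_lt_of_le hpq hple)
      simp only [List.map_cons, List.foldl_cons, hmax] at h
      rw [PySem.List.index?_cons_of_ne _ hqne] at h
      obtain ⟨k', hk', rfl⟩ := Option.map_eq_some_iff.mp h
      have := ih p k' (by simpa using hk')
      simpa [hrun, hpq] using this
    · -- seed stays q
      have hple : p.1 ≤ q.1 := not_lt.mp hpq
      have hmax : max q.1 p.1 = q.1 := max_eq_left hple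
      simp only [List.map_cons, List.foldl_cons, hmax] at h
      set M := (l.map Prod.fst).foldl max q.1 with hM
      by_cases hqM : q.1 = M
      · -- q.1 is the max: index? finds it at position 0
        rw [← hqM, PySem.List.index?_cons_self] at h
        obtain rfl : (0 : Nat) = k := by simpa using h
        have hIH := ih q 0 (by
          rw [← hM, ← hqM]
          simpa using PySem.List.index?_cons_self q.1 (l.map Prod.fst))
        simpa [hrun, hpq] using hIH
      · -- both heads are below the max
        have hpM : p.1 ≠ M := by
          have hqle : q.1 ≤ M := (PySem.List.le_foldl_max _ _).1
          exact ne_of_lt (lt_of_le_of_lt hple (lt_of_le_of_ne hqle hqM))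
        rw [PySem.List.index?_cons_of_ne _ hqM, PySem.List.index?_cons_of_ne _ hpM] at h
        obtain ⟨k2, hk2, rfl⟩ := Option.map_eq_some_iff.mp h
        obtain ⟨k3, hk3, rfl⟩ := Option.map_eq_some_iff.mp hk2
        have hIH := ih q (k3 + 1) (by
          rw [List.map_cons, PySem.List.index?_cons_of_ne _ hqM, hk3]; rfl)
        simpa [hrun, hpq, List.getD_cons_succ] using hIH

lemma pvAlt_cons (p0 : String × String) (rest : List (String × String)) :
    ent_chose_alt (p0 :: rest)
    = (PySem.Str.replace (pvRun (rest.map pvSt) (PySem.Str.replace p0.1 " " "", p0.2)).2 " " "",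
       (pvRun (rest.map pvSt) (PySem.Str.replace p0.1 " " "", p0.2)).1) := by
  have h := pvRun_eq_fold rest (PySem.Str.replace p0.1 " " "", p0.2)
  simp only [ent_chose_alt]
  rw [h]

-- ===== VERDICT (by name: the statement is the Claim_ definition above) =====
theorem ent_chose_spec : Claim_equal_ent_chose := by
  intro ent_list _ hpre
  obtain ⟨p0, rest, rfl⟩ : ∃ p q, ent_list = p :: q := by
    cases ent_list with
    | nil => exact absurd rfl hpre
    | cons a l => exact ⟨a, l, rfl⟩
  unfold Spec_ent_chose
  rw [pvAlt_cons]
  unfold ent_chose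
  by_cases hlen : (p0 :: rest).length > 1
  · rw [if_pos hlen]
    simp only [pvBuild, List.nil_append]
    set es := (p0 :: rest).map (fun p => PySem.Str.replace p.2 " " "") with hes
    set ts := (p0 :: rest).map (fun p => PySem.Str.replace p.1 " " "") with hts
    -- ts as head :: tail of the stripped list
    have hts' : ts = PySem.Str.replace p0.1 " " "" :: (rest.map pvSt).map Prod.fst := by
      simp [hts, pvSt, Function.comp]
    set M := ((rest.map pvSt).map Prod.fst).foldl max (PySem.Str.replace p0.1 " " "") with hMdef
    have hmax : PySem.List.max? ts (fun x => x) = some M := by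
      rw [hts']; exact PySem.List.max?_id_cons _ _
    have hMmem : M ∈ ts := by
      rw [hts']
      rcases PySem.List.foldl_max_mem ((rest.map pvSt).map Prod.fst) (PySem.Str.replace p0.1 " " "") with h | h
      · rw [hMdef, h]; exact List.mem_cons_self
      · exact List.mem_cons_of_mem _ h
    obtain ⟨k, hk⟩ := Option.isSome_iff_exists.mp ((PySem.List.index?_isSome_iff ts M).mpr hMmem)
    simp only [hmax, hk]
    -- relate the index? over ts to pvRun_spec's shape
    have hq : ((PySem.Str.replace p0.1 " " "", p0.2) :: rest.map pvSt).map Prod.fst = ts := by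
      simp [hts']
    have hrun := pvRun_spec (rest.map pvSt) (PySem.Str.replace p0.1 " " "", p0.2) k
      (by rw [hq, ← hMdef]; exact hk)
    obtain ⟨hklt, hkv, -⟩ := PySem.List.getElem_of_index?_eq_some hk
    have hklen : k < (p0 :: rest).length := by simpa [hts] using hklt
    -- compute both sides at index k
    have hstr : ((PySem.Str.replace p0.1 " " "", p0.2) :: rest.map pvSt)
        = (p0 :: rest).map pvSt := by simp [pvSt]
    rw [hrun, hstr]
    have h1 : ((p0 :: rest).map pvSt).getD k ("", "")
        = pvSt ((p0 :: rest).getD k ("", "")) := by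
      rw [List.getD_eq_getElem _ _ (by simpa using hklen), List.getD_eq_getElem _ _ hklen,
        List.getElem_map]
    have h2 : es.getD k "" = PySem.Str.replace ((p0 :: rest).getD k ("", "")).2 " " "" := by
      rw [hes, List.getD_eq_getElem _ _ (by simpa using hklen), List.getD_eq_getElem _ _ hklen,
        List.getElem_map]
    have h3 : ts.getD k "" = PySem.Str.replace ((p0 :: rest).getD k ("", "")).1 " " "" := by
      rw [hts, List.getD_eq_getElem _ _ (by simpa using hklen), List.getD_eq_getElem _ _ hklen,
        List.getElem_map]
    rw [h2, h3, h1]; simp [pvSt]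
  · -- singleton list
    have : rest = [] := by
      cases rest with
      | nil => rfl
      | cons a l => simp at hlen
    subst this
    simp [pvRun, PySem.List.pyGetD, PySem.List.pyGet?, PySem.List.pyIdx?]
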